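-- pv_equiv track=rewrite | github.com/Taha-Daniel/Ad_Scientam | atom_counter/utils.py | tuplist_to_dict
-- ===== SOURCE A (Python) =====
-- def tuplist_to_dict(tuplist):
--     """
--     Transform a tuple list [(str,int)] in dict{str:int} with summing between tuples having the same key
--     :param tuplist: tuple list [(str,int)]
--     :return: dict: {str:int}
--     """
--     dict = {}
--     for x, y in tuplist:
--         if x not in dict.keys():
--             dict[x] = int(y or 1)
--         else:
--             dict[x] += int(y or 1)
--     return dict
-- ===== SOURCE B (Python) =====
-- def tuplist_to_dict(tuplist):
--     """
--     Transform a tuple list [(str,int)] in dict{str:int} with summing between tuples having the same key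
--     (re-implementation: distinct keys in first-appearance order, then one group-sum per key)
--     """
--     return {k: sum(y or 1 for x, y in tuplist if x == k)
--             for k in dict.fromkeys(x for x, _ in tuplist)}
-- ===== Notes on version B (the rewrite author's own statement) =====
-- stated objective: simpler
-- what changed: A's incremental scan with a per-element membership test and in-place dict update is replaced by a two-phase grouped aggregate: collect the distinct keys in first-appearance order with dict.fromkeys, then build the result in one comprehension summing (y or 1) over each key's group.
import Mathlib
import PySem

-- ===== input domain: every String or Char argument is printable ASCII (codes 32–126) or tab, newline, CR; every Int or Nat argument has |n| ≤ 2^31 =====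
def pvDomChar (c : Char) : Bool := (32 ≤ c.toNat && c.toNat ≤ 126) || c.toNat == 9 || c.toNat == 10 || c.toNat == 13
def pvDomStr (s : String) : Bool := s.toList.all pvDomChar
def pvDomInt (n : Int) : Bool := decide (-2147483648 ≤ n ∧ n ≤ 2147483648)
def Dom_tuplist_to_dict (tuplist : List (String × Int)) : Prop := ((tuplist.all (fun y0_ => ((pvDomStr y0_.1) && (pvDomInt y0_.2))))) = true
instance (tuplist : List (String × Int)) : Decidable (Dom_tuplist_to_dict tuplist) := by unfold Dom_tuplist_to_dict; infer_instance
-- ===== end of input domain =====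

-- B changes the decomposition: distinct keys first, then one group-sum per key (same values and
-- key order as A; not faster — A is a single pass).

-- ===== PORT A =====
-- int(y or 1): y itself unless y == 0, in which case 1
def pyOr1 (y : Int) : Int := if y = 0 then 1 else y

def tuplist_to_dict (tuplist : List (String × Int)) : List (String × Int) :=
  (tuplist.foldl (fun d p =>
      if d.contains p.1 = false then d.insert p.1 (pyOr1 p.2)
      else d.insert p.1 (d.getD p.1 0 + pyOr1 p.2)) PySem.Dict.empty).items

-- ===== PORT B =====
-- sum(y or 1 for x, y in tuplist if x == k)
def groupSum (tuplist : List (String × Int)) (k : String) : Int :=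
  ((tuplist.filter (fun p => p.1 == k)).map (fun p => pyOr1 p.2)).sum

def tuplist_to_dict_alt (tuplist : List (String × Int)) : List (String × Int) :=
  (PySem.List.dedup (tuplist.map Prod.fst)).map (fun k => (k, groupSum tuplist k))

-- ===== PRECONDITION & SPEC =====
def Spec_tuplist_to_dict (tuplist : List (String × Int)) (out : List (String × Int)) : Prop := out = tuplist_to_dict_alt tuplist
instance (tuplist : List (String × Int)) (out : List (String × Int)) : Decidable (Spec_tuplist_to_dict tuplist out) := by unfold Spec_tuplist_to_dict; infer_instance

-- ===== CLAIM (what is proved, stated in full; the proofs are below) =====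
def Claim_equal_tuplist_to_dict : Prop := ∀ (tuplist : List (String × Int)), Dom_tuplist_to_dict tuplist → Spec_tuplist_to_dict tuplist (tuplist_to_dict tuplist)

-- ===== LEMMAS AND PROOFS =====

-- the new keys a scan of l appends after the already-present keys s (proof-only helper)
def newKeys (s : List String) : List String → List String
  | [] => []
  | a :: t => if a ∈ s then newKeys s t else a :: newKeys (s ++ [a]) t

theorem ofList_foldl_add (s : List String) (l : List String) :
    l.foldl PySem.Set.add s = s ++ newKeys s l := by
  induction l generalizing s with
  | nil => simp [newKeys]
  | cons a t ih =>
      simp only [List.foldl_cons, newKeys, PySem.Set.add]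
      by_cases h : a ∈ s
      · simp [h, ih]
      · simp [h, ih (s ++ [a])]

theorem mem_newKeys_not_mem (s : List String) (l : List String) (k : String)
    (hk : k ∈ newKeys s l) : k ∉ s := by
  induction l generalizing s with
  | nil => simp [newKeys] at hk
  | cons a t ih =>
      simp only [newKeys] at hk
      by_cases h : a ∈ s
      · exact ih s (by simpa [h] using hk)
      · rw [if_neg h] at hk
        rcases List.mem_cons.mp hk with rfl | hk'
        · exact h
        · have := ih (s ++ [a]) hk'
          intro hks; exact this (List.mem_append_left _ hks)

theorem groupSum_cons (p : String × Int) (t : List (String × Int)) (k : String) :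
    groupSum (p :: t) k = (if p.1 = k then pyOr1 p.2 else 0) + groupSum t k := by
  by_cases h : p.1 = k <;> simp [groupSum, h]

theorem fold_items (l : List (String × Int)) (d : PySem.Dict String Int)
    (hn : d.keys.Nodup) :
    (l.foldl (fun d p =>
      if d.contains p.1 = false then d.insert p.1 (pyOr1 p.2)
      else d.insert p.1 (d.getD p.1 0 + pyOr1 p.2)) d).items
    = d.items.map (fun q => (q.1, q.2 + groupSum l q.1))
      ++ (newKeys d.keys (l.map Prod.fst)).map (fun k => (k, groupSum l k)) := by
  induction l generalizing d with
  | nil => simp [newKeys, groupSum]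
  | cons p t ih =>
      simp only [List.foldl_cons, List.map_cons]
      by_cases hc : d.contains p.1 = true
      · -- key already present: in-place update, key list unchanged
        have hp : p.1 ∈ d.keys := (PySem.Dict.contains_iff_mem_keys d p.1).mp hc
        rw [if_neg (by simp [hc])]
        rw [ih _ (PySem.Dict.nodup_keys_insert d p.1 _ hn)]
        rw [PySem.Dict.items_insert_of_contains d _ hc,
            PySem.Dict.keys_insert_of_contains d _ hc,
            List.map_map]
        have hnk : newKeys d.keys (p.1 :: t.map Prod.fst) = newKeys d.keys (t.map Prod.fst) := by
          simp [newKeys, hp]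
        rw [hnk]
        congr 1
        · apply List.map_congr_left
          intro q hq
          by_cases hqp : q.1 = p.1
          · have hmem : (q.1, q.2) ∈ d.items := hq
            have hget : d.getD q.1 0 = q.2 :=
              PySem.Dict.getD_of_mem_items d hmem hn 0
            simp only [Function.comp, hqp, beq_self_eq_true, if_pos]
            rw [← hqp, hget, groupSum_cons, if_pos hqp.symm, add_assoc]
          · have : (q.1 == p.1) = false := by simpa using hqp
            simp only [Function.comp, this, Bool.false_eq_true, if_neg, not_false_iff]
            rw [groupSum_cons, if_neg (fun h => hqp h.symm)]
            simp
        · apply List.map_congr_left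
          intro k hk
          have hks : k ∉ d.keys := mem_newKeys_not_mem _ _ _ hk
          have hkp : p.1 ≠ k := fun h => hks (h ▸ hp)
          rw [groupSum_cons, if_neg hkp]
          simp
      · -- new key: appended at the end
        have hc' : d.contains p.1 = false := by simpa using hc
        have hp : p.1 ∉ d.keys := fun h => by
          simp [(PySem.Dict.contains_iff_mem_keys d p.1).mpr h] at hc'
        rw [if_pos hc']
        rw [ih _ (PySem.Dict.nodup_keys_insert d p.1 _ hn)]
        rw [PySem.Dict.items_insert_of_not_contains d _ hc',
            PySem.Dict.keys_insert_of_not_contains d _ hc']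
        have hnk : newKeys d.keys (p.1 :: t.map Prod.fst)
            = p.1 :: newKeys (d.keys ++ [p.1]) (t.map Prod.fst) := by
          simp [newKeys, hp]
        have e1 : List.map (fun q => (q.1, q.2 + groupSum (p :: t) q.1)) d.items
            = List.map (fun q => (q.1, q.2 + groupSum t q.1)) d.items := by
          apply List.map_congr_left
          intro q hq
          have hqk : q.1 ∈ d.keys := PySem.Dict.mem_keys_of_mem_items d hq
          rw [groupSum_cons, if_neg (fun h => hp (by rw [h]; exact hqk))]
          simp
        have e2 : List.map (fun k => (k, groupSum (p :: t) k))
              (newKeys (d.keys ++ [p.1]) (t.map Prod.fst))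
            = List.map (fun k => (k, groupSum t k))
              (newKeys (d.keys ++ [p.1]) (t.map Prod.fst)) := by
          apply List.map_congr_left
          intro k hk
          have hks : k ∉ d.keys ++ [p.1] := mem_newKeys_not_mem _ _ _ hk
          have hkp : p.1 ≠ k := fun h => hks (List.mem_append_right _ (by simp [h]))
          rw [groupSum_cons, if_neg hkp]
          simp
        have e3 : (p.1, groupSum (p :: t) p.1)
            = (p.1, pyOr1 p.2 + groupSum t p.1) := by
          rw [groupSum_cons, if_pos rfl]
        rw [hnk]
        simp only [List.map_append, List.map_cons, List.map_nil, e1, e2, e3,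
          List.append_assoc, List.cons_append, List.nil_append]

-- ===== VERDICT (by name: the statement is the Claim_ definition above) =====
theorem tuplist_to_dict_spec : Claim_equal_tuplist_to_dict := by
  intro tuplist _
  unfold Spec_tuplist_to_dict tuplist_to_dict tuplist_to_dict_alt
  rw [fold_items tuplist PySem.Dict.empty PySem.Dict.nodup_keys_empty]
  simp only [PySem.List.dedup, PySem.Set.ofList, PySem.Set.empty,
    ofList_foldl_add, PySem.Dict.empty, PySem.Dict.keys,
    List.map_nil, List.nil_append]
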